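-- pv_equiv track=rewrite | github.com/Mickael-Desclaux/advent_of_code_2023 | Day 1/2nd Half/Calibrator.py | get_letter_digit
-- ===== SOURCE A (Python) =====
-- def get_letter_digit(text: str, letter_digit: dict) -> tuple:
--     words = text.split()
--     first_digit = None
--     last_digit = None
--     for word in words:
--         try:
--             if word in letter_digit:
--                 digit = letter_digit[word]
--                 if first_digit is None:
--                     first_digit = digit
--                 last_digit = digit
--         except ValueError:
--             continue
--
--     return first_digit, last_digit
-- ===== SOURCE B (Python) =====
-- def get_letter_digit(text: str, letter_digit: dict) -> tuple:
--     words = text.split()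
--     first = next((letter_digit[w] for w in words if w in letter_digit), None)
--     last = next((letter_digit[w] for w in reversed(words) if w in letter_digit), None)
--     return first, last
-- ===== Notes on version B (the rewrite author's own statement) =====
-- stated objective: alternative
-- what changed: Replaces the single full pass that accumulates first/last (with its dead try/except) by two independent early-terminating searches: the first match scanning the words left-to-right, and the last match as the first match of the reversed word list.
import Mathlib
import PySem

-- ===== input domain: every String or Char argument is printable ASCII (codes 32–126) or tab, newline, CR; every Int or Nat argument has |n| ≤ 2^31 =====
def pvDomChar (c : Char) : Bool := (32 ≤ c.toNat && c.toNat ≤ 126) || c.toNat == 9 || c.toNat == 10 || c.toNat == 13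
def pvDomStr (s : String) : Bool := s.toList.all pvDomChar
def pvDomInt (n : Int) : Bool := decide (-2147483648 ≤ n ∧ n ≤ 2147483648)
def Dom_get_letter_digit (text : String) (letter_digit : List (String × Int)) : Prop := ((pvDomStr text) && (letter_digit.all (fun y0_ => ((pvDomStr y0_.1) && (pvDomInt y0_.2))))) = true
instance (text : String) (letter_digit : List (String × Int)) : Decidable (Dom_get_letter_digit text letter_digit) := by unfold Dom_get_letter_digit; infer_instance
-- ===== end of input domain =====

-- B replaces A's single accumulator pass with two independent early-exit searches:
-- first match left-to-right, and last match as the first match of the reversed word list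
-- (objective: alternative).

-- ===== PORT A =====
-- dict lookup (Python dict -> assoc list, first match)
def ldGet? (letter_digit : List (String × Int)) (w : String) : Option Int :=
  match letter_digit with
  | [] => none
  | (k, v) :: rest => if k == w then some v else ldGet? rest w

def get_letter_digit (text : String) (letter_digit : List (String × Int)) : Option Int × Option Int :=
  (PySem.Str.split₀ text).foldl
    (fun st w =>
      match ldGet? letter_digit w with
      | some d => ((if st.1 = none then some d else st.1), some d)
      | none => st)
    (none, none)

-- ===== PORT B =====
-- first digit found scanning the given word list (early exit), as B's next(...)
def findDigit (letter_digit : List (String × Int)) : List String → Option Int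
  | [] => none
  | w :: ws =>
    match ldGet? letter_digit w with
    | some d => some d
    | none => findDigit letter_digit ws

def get_letter_digit_alt (text : String) (letter_digit : List (String × Int)) : Option Int × Option Int :=
  let words := PySem.Str.split₀ text
  (findDigit letter_digit words, findDigit letter_digit words.reverse)

-- ===== PRECONDITION & SPEC =====
def Spec_get_letter_digit (text : String) (letter_digit : List (String × Int)) (out : Option Int × Option Int) : Prop := out = get_letter_digit_alt text letter_digit
instance (text : String) (letter_digit : List (String × Int)) (out : Option Int × Option Int) : Decidable (Spec_get_letter_digit text letter_digit out) := by unfold Spec_get_letter_digit; infer_instance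

-- ===== CLAIM (what is proved, stated in full; the proofs are below) =====
def Claim_equal_get_letter_digit : Prop := ∀ (text : String) (letter_digit : List (String × Int)), Dom_get_letter_digit text letter_digit → Spec_get_letter_digit text letter_digit (get_letter_digit text letter_digit)

-- ===== LEMMAS AND PROOFS =====
theorem findDigit_eq_head (g : List (String × Int)) (ws : List String) :
    findDigit g ws = (ws.filterMap (ldGet? g)).head? := by
  induction ws with
  | nil => simp [findDigit]
  | cons w ws ih =>
    simp only [findDigit, List.filterMap_cons]
    cases ldGet? g w <;> simp [ih]

theorem fold_eq_endpoints (g : String → Option Int) (ws : List String) (f l : Option Int) :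
    ws.foldl (fun st w => match g w with
      | some d => ((if st.1 = none then some d else st.1), some d)
      | none => st) (f, l)
    = (f.orElse (fun _ => (ws.filterMap g).head?),
       ((ws.filterMap g).getLast?).orElse (fun _ => l)) := by
  induction ws generalizing f l with
  | nil => simp
  | cons w ws ih =>
    simp only [List.foldl_cons, List.filterMap_cons]
    cases hg : g w with
    | none => simp [ih]
    | some d =>
      simp only [ih]
      cases hms : ws.filterMap g with
      | nil => cases f <;> simp
      | cons m ms =>
        obtain ⟨x, hx⟩ : ∃ x, (m :: ms).getLast? = some x :=
          Option.isSome_iff_exists.mp (by simp)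
        cases f <;> simp [hx, Option.orElse]

-- ===== VERDICT (by name: the statement is the Claim_ definition above) =====
theorem get_letter_digit_spec : Claim_equal_get_letter_digit := by
  intro text letter_digit _
  unfold Spec_get_letter_digit get_letter_digit get_letter_digit_alt
  rw [fold_eq_endpoints]
  simp [findDigit_eq_head, List.filterMap_reverse, List.head?_reverse]
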